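-- pv_equiv track=rewrite | github.com/WWarzecha/Algorithms-and-Data-Structures | Dynamic programming problems with tests/zad3k.py | ksuma
-- ===== SOURCE A (Python) =====
-- def min_elem(T):
--     n = len(T) # == k
--     minimal = float('inf')
--     for i in range (n):
--         if T[i] < minimal:
--             minimal = T[i]
--     return minimal
--
-- def ksuma( T, k ):
--     min = float('inf')
--     F = []
--     n = len(T)
--
--     for i in range (k):
--         F.append(T[i])
--
--     for i in range (k,n):
--         p = min_elem(F)
--         T[i] += p
--         F.pop(0)
--         F.append(T[i])
--
--     for i in range(n-k,n):
--         if T[i] < min: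
--             min = T[i]
--
--     return min
-- ===== SOURCE B (Python) =====
-- def _push(stk, v):
--     # push v on a min-stack: each entry is (value, min of values at or below it)
--     if stk and stk[-1][1] <= v:
--         stk.append((v, stk[-1][1]))
--     else:
--         stk.append((v, v))
--
--
-- def ksuma(T, k):
--     n = len(T)
--     vals = list(T)
--     instk = []   # back of the window queue
--     outstk = []  # front of the window queue (two-stack min-queue)
--     for i in range(k):
--         _push(instk, vals[i])
--     for i in range(k, n):
--         if instk and outstk:
--             wmin = min(instk[-1][1], outstk[-1][1])
--         elif instk:
--             wmin = instk[-1][1]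
--         else:
--             wmin = outstk[-1][1]
--         vals[i] += wmin
--         if not outstk:
--             while instk:
--                 _push(outstk, instk.pop()[0])
--         outstk.pop()
--         _push(instk, vals[i])
--     return min(vals[n - k:])
-- ===== Notes on version B (the rewrite author's own statement) =====
-- stated objective: faster
-- what changed: A rescans the whole k-element window with a handwritten min on every step (O(n*k)); B maintains the window in a two-stack min-queue whose stack tops carry running minima, so each element is pushed and popped at most twice (O(n) amortized).
-- outside the precondition, e.g. on ksuma([], 0): A returns inf, B raises ValueError
import Mathlib
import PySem

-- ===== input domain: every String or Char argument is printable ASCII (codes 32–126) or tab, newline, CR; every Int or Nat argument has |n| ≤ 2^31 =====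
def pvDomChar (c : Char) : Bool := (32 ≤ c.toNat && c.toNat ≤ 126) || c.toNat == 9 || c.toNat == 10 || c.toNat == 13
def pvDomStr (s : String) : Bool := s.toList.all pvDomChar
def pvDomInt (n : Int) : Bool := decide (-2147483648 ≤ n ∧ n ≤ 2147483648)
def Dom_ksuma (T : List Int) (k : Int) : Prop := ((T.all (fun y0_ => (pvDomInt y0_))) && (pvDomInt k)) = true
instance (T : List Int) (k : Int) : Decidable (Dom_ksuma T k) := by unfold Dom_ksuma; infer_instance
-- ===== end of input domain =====

-- B replaces A's O(n·k) re-scan of the window with a two-stack min-queue (O(n) amortized).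
-- A mutates its argument T in place; B does not — the equivalence proved here is about the RETURN value only.

-- ===== PORT A =====
-- min_elem: Python's float('inf') sentinel is modelled as `none` (every int is < inf, so the
-- first element always replaces it); all indices i ∈ range(len(T)) are in range, so pyGetD is exact.
def min_elem (T : List Int) : Option Int :=
  (PySem.List.pyRange 0 (T.length : Int) 1).foldl
    (fun minimal i =>
      let t := PySem.List.pyGetD T i 0
      match minimal with
      | none => some t
      | some m => if t < m then some t else minimal) none

-- `(min_elem …).getD 0` and `.getD []`: under Pre_ksuma the window F is never empty, so the
-- float('inf') case of min_elem and the IndexError of F.pop(0) are unreachable; likewise the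
-- final `.getD 0` (third loop runs at least once).  All pyGetD/pySetD indices are in range under Pre_.
def ksuma (T : List Int) (k : Int) : Int :=
  let n : Int := (T.length : Int)
  let F := (PySem.List.pyRange 0 k 1).foldl
    (fun F i => F ++ [PySem.List.pyGetD T i 0]) ([] : List Int)
  let st := (PySem.List.pyRange k n 1).foldl
    (fun (st : List Int × List Int) i =>
      let p := (min_elem st.2).getD 0
      let ti := PySem.List.pyGetD st.1 i 0 + p
      (PySem.List.pySetD st.1 i ti,
       ((PySem.List.pop? st.2 0).map Prod.snd).getD [] ++ [ti])) (T, F)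
  let mfin := (PySem.List.pyRange (n - k) n 1).foldl
    (fun m i =>
      let t := PySem.List.pyGetD st.1 i 0
      match m with
      | none => some t
      | some mv => if t < mv then some t else m) (none : Option Int)
  mfin.getD 0

-- ===== PORT B =====
-- stacks grow at the HEAD (Lean list head = Python list's last element / top of stack)
def bPush (v : Int) (stk : List (Int × Int)) : List (Int × Int) :=
  match stk with
  | (w, m) :: t => if m ≤ v then (v, m) :: (w, m) :: t else (v, v) :: (w, m) :: t
  | [] => [(v, v)]

-- the `while instk: _push(outstk, instk.pop()[0])` loop
def bDrain : List (Int × Int) → List (Int × Int) → List (Int × Int)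
  | [], outstk => outstk
  | p :: t, outstk => bDrain t (bPush p.1 outstk)

-- the headD defaults in wmin and the empty-`tail` are unreachable under Pre_ksuma
-- (the window always holds k ≥ 1 elements); pyGetD/pySetD indices are in range under Pre_.
def ksuma_alt (T : List Int) (k : Int) : Int :=
  let n : Int := (T.length : Int)
  let st0 := (PySem.List.pyRange 0 k 1).foldl
    (fun (st : List Int × List (Int × Int) × List (Int × Int)) i =>
      (st.1, bPush (PySem.List.pyGetD st.1 i 0) st.2.1, st.2.2)) (T, [], [])
  let st := (PySem.List.pyRange k n 1).foldl
    (fun (st : List Int × List (Int × Int) × List (Int × Int)) i =>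
      let wmin :=
        if st.2.1.isEmpty = false && st.2.2.isEmpty = false then
          min (st.2.1.headD (0, 0)).2 (st.2.2.headD (0, 0)).2
        else if st.2.1.isEmpty = false then (st.2.1.headD (0, 0)).2
        else (st.2.2.headD (0, 0)).2
      let v := PySem.List.pyGetD st.1 i 0 + wmin
      let vals := PySem.List.pySetD st.1 i v
      let (instk, outstk) :=
        if st.2.2.isEmpty then (([] : List (Int × Int)), bDrain st.2.1 st.2.2)
        else (st.2.1, st.2.2)
      (vals, bPush v instk, outstk.tail)) st0
  ((PySem.List.min? (PySem.List.slice st.1 (some (n - k)) none) (fun x => x)).getD 0)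

-- ===== PRECONDITION & SPEC =====
-- Pre_ excludes exactly the inputs where A does not return an int: for k > len(T), k < 0, and
-- 0 = k < len(T) A raises IndexError; for k = 0 = len(T) A returns float('inf'), not an int.
def Pre_ksuma (T : List Int) (k : Int) : Prop := 1 ≤ k ∧ k ≤ (T.length : Int)
instance (T : List Int) (k : Int) : Decidable (Pre_ksuma T k) := by unfold Pre_ksuma; infer_instance
def pvWitness_ksuma : List Int × Int := ([3, 1, 4, 1, 5], 2)

def Spec_ksuma (T : List Int) (k : Int) (out : Int) : Prop := out = ksuma_alt T k
instance (T : List Int) (k : Int) (out : Int) : Decidable (Spec_ksuma T k out) := by unfold Spec_ksuma; infer_instance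

-- ===== CLAIM (what is proved, stated in full; the proofs are below) =====
def Claim_equal_ksuma : Prop := ∀ (T : List Int) (k : Int), Dom_ksuma T k → Pre_ksuma T k → Spec_ksuma T k (ksuma T k)

-- ===== LEMMAS AND PROOFS =====



def minStep (m : Option Int) (t : Int) : Option Int :=
  match m with
  | none => some t
  | some mv => if t < mv then some t else m

def omin : Option Int → Option Int → Option Int
  | none, b => b
  | some a, none => some a
  | some a, some b => some (min a b)

theorem min?_cons' (x : Int) (l : List Int) : (x :: l).min? = omin (some x) l.min? := by
  rw [List.min?_cons]
  cases l.min? <;> simp [omin, Option.elim]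

theorem foldl_min_eq (l : List Int) (a : Int) : l.foldl min a = l.min?.elim a (min a) := by
  induction l generalizing a with
  | nil => simp
  | cons w t ih =>
    simp only [List.foldl_cons, ih, min?_cons']
    cases t.min? with
    | none => simp [omin]
    | some m => simp [omin, min_assoc]

theorem foldl_minStep_some (l : List Int) (a : Int) :
    l.foldl minStep (some a) = some (l.min?.elim a (min a)) := by
  induction l generalizing a with
  | nil => simp
  | cons w t ih =>
    have hstep : minStep (some a) w = some (min a w) := by
      simp only [minStep]
      rcases lt_or_ge w a with h | h
      · rw [if_pos h, min_eq_right (le_of_lt h)]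
      · rw [if_neg (not_lt.2 h), min_eq_left h]
    simp only [List.foldl_cons, hstep, ih, min?_cons']
    cases t.min? with
    | none => simp [omin]
    | some m => simp [omin, min_assoc]

theorem foldl_minStep (l : List Int) : l.foldl minStep none = l.min? := by
  cases l with
  | nil => rfl
  | cons x t =>
    have : minStep none x = some x := rfl
    simp only [List.foldl_cons, this, foldl_minStep_some, min?_cons']
    cases t.min? <;> simp [omin]

theorem omin_assoc (a b c : Option Int) : omin (omin a b) c = omin a (omin b c) := by
  cases a <;> cases b <;> cases c <;> simp [omin, min_assoc]

theorem omin_comm (a b : Option Int) : omin a b = omin b a := by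
  cases a <;> cases b <;> simp [omin, min_comm]

theorem min?_append (l1 l2 : List Int) : (l1 ++ l2).min? = omin l1.min? l2.min? := by
  induction l1 with
  | nil => simp [omin]
  | cons x t ih => simp only [List.cons_append, min?_cons', ih, omin_assoc]

theorem min?_reverse (l : List Int) : l.reverse.min? = l.min? := by
  induction l with
  | nil => rfl
  | cons x t ih =>
    simp only [List.reverse_cons, min?_append, ih, min?_cons', List.min?_nil]
    rw [omin_comm]
    cases t.min? <;> simp [omin]

theorem pymin_eq (l : List Int) : PySem.List.min? l (fun y => y) = l.min? := by
  cases l with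
  | nil => simp [PySem.List.min?_eq_none_iff]
  | cons x t => rw [PySem.List.min?_id_cons, List.min?_cons, foldl_min_eq]

def StkOk : List (Int × Int) → Prop
  | [] => True
  | (v, m) :: t => (m = match t with | [] => v | q :: _ => min v q.2) ∧ StkOk t

theorem stkOk_min? (s : List (Int × Int)) (h : StkOk s) :
    (s.map Prod.fst).min? = s.head?.map Prod.snd := by
  induction s with
  | nil => rfl
  | cons p t ih =>
    obtain ⟨v, m⟩ := p
    cases t with
    | nil =>
      obtain ⟨hm, -⟩ := h
      simp [min?_cons', omin, hm]
    | cons q t' =>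
      obtain ⟨hm, ht⟩ := h
      have hq : m = min v q.2 := hm
      rw [List.map_cons, min?_cons', ih ht]
      simp [omin, hq]

theorem stkOk_push (v : Int) (s : List (Int × Int)) (h : StkOk s) : StkOk (bPush v s) := by
  cases s with
  | nil => exact ⟨rfl, trivial⟩
  | cons p t =>
    obtain ⟨w, m⟩ := p
    simp only [bPush]
    split
    · exact ⟨by rename_i hle; simp [min_eq_right hle], h⟩
    · rename_i hlt
      exact ⟨by simp [min_eq_left (by omega : v ≤ m)], h⟩

theorem map_fst_push (v : Int) (s : List (Int × Int)) :
    (bPush v s).map Prod.fst = v :: s.map Prod.fst := by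
  cases s with
  | nil => rfl
  | cons p t => cases p; simp only [bPush]; split <;> simp

theorem stkOk_tail (s : List (Int × Int)) (h : StkOk s) : StkOk s.tail := by
  cases s with
  | nil => exact h
  | cons p t => cases p; exact h.2

theorem bDrain_spec (s o : List (Int × Int)) (h : StkOk o) :
    StkOk (bDrain s o) ∧ (bDrain s o).map Prod.fst = (s.map Prod.fst).reverse ++ o.map Prod.fst := by
  induction s generalizing o with
  | nil => exact ⟨h, by simp [bDrain]⟩
  | cons p t ih =>
    obtain ⟨h1, h2⟩ := ih (bPush p.1 o) (stkOk_push p.1 o h)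
    exact ⟨h1, by simp [bDrain, h2, map_fst_push]⟩

def Vl (T : List Int) (kn : Nat) : Nat → List Int
  | 0 => []
  | i + 1 =>
    let p := Vl T kn i
    p ++ [T.getD i 0 + (if kn ≤ i then ((p.drop (i - kn)).min?.getD 0) else 0)]

theorem Vl_length (T : List Int) (kn : Nat) (i : Nat) : (Vl T kn i).length = i := by
  induction i with
  | zero => rfl
  | succ i ih => simp [Vl, ih]

theorem Vl_take (T : List Int) (kn i : Nat) (h : i ≤ kn) (hlen : i ≤ T.length) :
    Vl T kn i = T.take i := by
  induction i with
  | zero => rfl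
  | succ i ih =>
    have hi : i < T.length := hlen
    have hg : T.getD i 0 = T[i] := List.getD_eq_getElem T 0 hi
    show Vl T kn i ++ [T.getD i 0 + (if kn ≤ i then ((Vl T kn i).drop (i - kn)).min?.getD 0 else 0)] = T.take (i + 1)
    rw [ih (Nat.le_of_succ_le h) (le_of_lt hi), if_neg (Nat.not_le.2 h), add_zero,
      List.take_add_one, List.getElem?_eq_getElem hi, hg]
    rfl

-- ===== step functions (definitionally equal to the ports' loop bodies) =====
def stepA (st : List Int × List Int) (i : Int) : List Int × List Int :=
  let p := (min_elem st.2).getD 0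
  let ti := PySem.List.pyGetD st.1 i 0 + p
  (PySem.List.pySetD st.1 i ti,
   ((PySem.List.pop? st.2 0).map Prod.snd).getD [] ++ [ti])

def stepInit (st : List Int × List (Int × Int) × List (Int × Int)) (i : Int) :
    List Int × List (Int × Int) × List (Int × Int) :=
  (st.1, bPush (PySem.List.pyGetD st.1 i 0) st.2.1, st.2.2)

def stepB (st : List Int × List (Int × Int) × List (Int × Int)) (i : Int) :
    List Int × List (Int × Int) × List (Int × Int) :=
  let wmin :=
    if st.2.1.isEmpty = false && st.2.2.isEmpty = false then
      min (st.2.1.headD (0, 0)).2 (st.2.2.headD (0, 0)).2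
    else if st.2.1.isEmpty = false then (st.2.1.headD (0, 0)).2
    else (st.2.2.headD (0, 0)).2
  let v := PySem.List.pyGetD st.1 i 0 + wmin
  let vals := PySem.List.pySetD st.1 i v
  let (instk, outstk) :=
    if st.2.2.isEmpty then (([] : List (Int × Int)), bDrain st.2.1 st.2.2)
    else (st.2.1, st.2.2)
  (vals, bPush v instk, outstk.tail)

theorem ksuma_as_steps (T : List Int) (k : Int) :
    ksuma T k =
      (let n : Int := (T.length : Int)
       let F := (PySem.List.pyRange 0 k 1).foldl
         (fun F i => F ++ [PySem.List.pyGetD T i 0]) ([] : List Int)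
       let st := (PySem.List.pyRange k n 1).foldl stepA (T, F)
       ((PySem.List.pyRange (n - k) n 1).foldl
         (fun m i => minStep m (PySem.List.pyGetD st.1 i 0)) (none : Option Int)).getD 0) := rfl

theorem ksuma_alt_as_steps (T : List Int) (k : Int) :
    ksuma_alt T k =
      (let n : Int := (T.length : Int)
       let st0 := (PySem.List.pyRange 0 k 1).foldl stepInit (T, [], [])
       let st := (PySem.List.pyRange k n 1).foldl stepB st0
       ((PySem.List.min? (PySem.List.slice st.1 (some (n - k)) none) (fun x => x)).getD 0)) := rfl

theorem min_elem_eq (l : List Int) : min_elem l = l.min? := by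
  have h := PySem.List.foldl_pyRange_pyGetD l 0 minStep (none : Option Int) (a := 0) le_rfl
  unfold min_elem
  rw [show ((l.length : Int)) = PySem.List.len l from rfl]
  rw [show (fun (minimal : Option Int) (i : Int) =>
        let t := PySem.List.pyGetD l i 0
        match minimal with
        | none => some t
        | some m => if t < m then some t else minimal) =
      (fun acc j => minStep acc (PySem.List.pyGetD l j 0)) from rfl]
  rw [h]
  simpa using foldl_minStep l

theorem get_mid (T : List Int) (kn i : Nat) (hin : i < T.length) :
    PySem.List.pyGetD (Vl T kn i ++ T.drop i) (i : Int) 0 = T.getD i 0 := by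
  rw [PySem.List.pyGetD_natCast]
  unfold List.getD
  rw [List.getElem?_append_right (by rw [Vl_length]), Vl_length, Nat.sub_self,
    List.getElem?_drop, Nat.add_zero]

theorem set_mid (T : List Int) (kn i : Nat) (hin : i < T.length) (v : Int) :
    PySem.List.pySetD (Vl T kn i ++ T.drop i) (i : Int) v =
      (Vl T kn i ++ [v]) ++ T.drop (i + 1) := by
  rw [PySem.List.pySetD_of_nonneg _ _ (Int.natCast_nonneg i), Int.toNat_natCast,
    List.set_append_right _ _ (by rw [Vl_length]), Vl_length, Nat.sub_self,
    List.drop_eq_getElem_cons hin, List.set_cons_zero, List.append_assoc,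
    List.singleton_append]

theorem window_next (T : List Int) (kn i : Nat) (hk : 1 ≤ kn) (hik : kn ≤ i) (v : Int) :
    ((Vl T kn i).drop (i - kn)).tail ++ [v] = (Vl T kn i ++ [v]).drop (i + 1 - kn) := by
  rw [List.tail_drop, List.drop_append_of_le_length (by rw [Vl_length]; omega)]
  congr 2
  omega

theorem Vl_succ (T : List Int) (kn i : Nat) (hik : kn ≤ i) :
    Vl T kn (i + 1) =
      Vl T kn i ++ [T.getD i 0 + ((Vl T kn i).drop (i - kn)).min?.getD 0] := by
  show Vl T kn i ++ [T.getD i 0 + (if kn ≤ i then ((Vl T kn i).drop (i - kn)).min?.getD 0 else 0)] = _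
  rw [if_pos hik]

theorem window_ne_nil (T : List Int) (kn i : Nat) (hk : 1 ≤ kn) (hik : kn ≤ i)
    (hin : i ≤ T.length) : (Vl T kn i).drop (i - kn) ≠ [] := by
  intro h
  have := congrArg List.length h
  rw [List.length_drop, Vl_length] at this
  simp at this
  omega

theorem A_loop (T : List Int) (kn : Nat) (hk : 1 ≤ kn) (hkn : kn ≤ T.length)
    (i : Nat) (hik : kn ≤ i) (hin : i ≤ T.length) :
    (PySem.List.pyRange (kn : Int) (i : Int) 1).foldl stepA (T, T.take kn) =
      (Vl T kn i ++ T.drop i, (Vl T kn i).drop (i - kn)) := by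
  induction i, hik using Nat.le_induction with
  | base =>
    rw [PySem.List.pyRange_one_eq_nil le_rfl]
    rw [Vl_take T kn kn le_rfl hkn]
    simp
  | succ i hik ih =>
    have hin' : i < T.length := by omega
    have hcast : ((i + 1 : Nat) : Int) = (i : Int) + 1 := by push_cast; ring
    rw [hcast, PySem.List.pyRange_one_succ_right (by exact_mod_cast hik), List.foldl_append,
      ih (le_of_lt hin')]
    -- one step
    obtain ⟨f0, F', hF⟩ := List.exists_cons_of_ne_nil (window_ne_nil T kn i hk hik (le_of_lt hin'))
    show stepA _ _ = _
    unfold stepA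
    rw [get_mid T kn i hin', min_elem_eq]
    rw [hF, PySem.List.pop?_zero_cons]
    simp only [Option.map_some, Option.getD_some]
    rw [← hF]
    have hmin : (((Vl T kn i).drop (i - kn)).min?).getD 0 =
        ((Vl T kn i).drop (i - kn)).min?.getD 0 := rfl
    rw [set_mid T kn i hin', ← Vl_succ T kn i hik]
    have hF' : F' = ((Vl T kn i).drop (i - kn)).tail := by rw [hF]; rfl
    rw [hF', window_next T kn i hk hik, ← Vl_succ T kn i hik]

theorem take_eq_map_range (T : List Int) (kn : Nat) (hkn : kn ≤ T.length) :
    (List.range kn).map (fun j => T.getD j 0) = T.take kn := by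
  induction kn with
  | zero => rfl
  | succ m ih =>
    have hm : m < T.length := hkn
    rw [List.range_succ, List.map_append, ih (le_of_lt hm), List.map_singleton,
      List.getD_eq_getElem T 0 hm, List.take_add_one, List.getElem?_eq_getElem hm]
    rfl

theorem ksuma_eq (T : List Int) (k : Int) (h1 : 1 ≤ k) (h2 : k ≤ (T.length : Int)) :
    ksuma T k = ((Vl T k.toNat T.length).drop (T.length - k.toNat)).min?.getD 0 := by
  set kn := k.toNat with hknd
  have hkcast : (kn : Int) = k := Int.toNat_of_nonneg (by omega)
  have hk : 1 ≤ kn := by omega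
  have hkn : kn ≤ T.length := by omega
  rw [ksuma_as_steps]
  simp only
  rw [PySem.List.foldl_append_singleton_eq_map, List.nil_append, ← hkcast,
    PySem.List.pyRange_zero_natCast, List.map_map]
  have hmap : (List.range kn).map ((fun i => PySem.List.pyGetD T i 0) ∘ (fun (j : Nat) => (j : Int)))
      = T.take kn := by
    rw [← take_eq_map_range T kn hkn]
    apply List.map_congr_left
    intro j hj
    simp [PySem.List.pyGetD_natCast]
  rw [hmap, A_loop T kn hk hkn T.length hkn le_rfl]
  -- third loop
  have hfst : (Vl T kn T.length ++ T.drop T.length, (Vl T kn T.length).drop (T.length - kn)).1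
      = Vl T kn T.length := by simp
  rw [hfst]
  have hlen' : PySem.List.len (Vl T kn T.length) = ((T.length : Int)) := by
    simp [PySem.List.len_eq, Vl_length]
  rw [show PySem.List.pyRange ((T.length : Int) - (kn : Int)) ((T.length : Int)) =
      PySem.List.pyRange ((T.length : Int) - (kn : Int)) (PySem.List.len (Vl T kn T.length)) from by
    rw [hlen']]
  rw [PySem.List.foldl_pyRange_pyGetD _ 0 minStep (none : Option Int)
    (a := (T.length : Int) - (kn : Int)) (by omega), foldl_minStep]
  rw [show ((T.length : Int) - (kn : Int)).toNat = T.length - kn from by omega]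

-- B-side invariant: vals agrees with the DP prefix, both stacks are valid min-stacks, and the
-- queue contents (front to back) are exactly the current window of DP values
def BInv (T : List Int) (kn i : Nat) (st : List Int × List (Int × Int) × List (Int × Int)) : Prop :=
  st.1 = Vl T kn i ++ T.drop i ∧ StkOk st.2.1 ∧ StkOk st.2.2 ∧
    st.2.2.map Prod.fst ++ (st.2.1.map Prod.fst).reverse = (Vl T kn i).drop (i - kn)

theorem B_init (T : List Int) (kn : Nat) (hkn : kn ≤ T.length) (j : Nat) (hj : j ≤ kn) :
    ∃ s, (PySem.List.pyRange 0 (j : Int) 1).foldl stepInit (T, [], []) = (T, s, []) ∧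
      StkOk s ∧ s.map Prod.fst = (T.take j).reverse := by
  induction j with
  | zero =>
    exact ⟨[], by simp [PySem.List.pyRange_one_eq_nil], trivial, by simp⟩
  | succ j ih =>
    obtain ⟨s, hfold, hok, hmap⟩ := ih (by omega)
    have hj' : j < T.length := by omega
    have hcast : ((j + 1 : Nat) : Int) = (j : Int) + 1 := by push_cast; ring
    refine ⟨bPush (T.getD j 0) s, ?_, stkOk_push _ _ hok, ?_⟩
    · rw [hcast, PySem.List.pyRange_one_succ_right (Int.natCast_nonneg j), List.foldl_append,
        hfold]
      show (T, bPush (PySem.List.pyGetD T (j : Int) 0) s, []) = _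
      rw [PySem.List.pyGetD_natCast]
    · rw [map_fst_push, hmap, List.getD_eq_getElem T 0 hj']
      rw [show List.take (j + 1) T = List.take j T ++ [T[j]] from by
        rw [List.take_add_one, List.getElem?_eq_getElem hj']; rfl]
      rw [List.reverse_append]
      rfl

theorem binv_assemble (T : List Int) (kn i : Nat) (hk : 1 ≤ kn) (hik : kn ≤ i)
    (hin : i < T.length) (vals : List Int) (ins' outs0 : List (Int × Int)) (v : Int)
    (hvals : vals = Vl T kn i ++ T.drop i)
    (hins' : StkOk ins') (houts0 : StkOk outs0)
    (hc : outs0.map Prod.fst ++ (ins'.map Prod.fst).reverse = (Vl T kn i).drop (i - kn))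
    (houtsne : outs0 ≠ [])
    (hv : v = T.getD i 0 + ((Vl T kn i).drop (i - kn)).min?.getD 0) :
    BInv T kn (i + 1) (PySem.List.pySetD vals (i : Int) v, bPush v ins', outs0.tail) := by
  obtain ⟨q, rest, rfl⟩ := List.exists_cons_of_ne_nil houtsne
  subst hv
  have hctail : rest.map Prod.fst ++ (ins'.map Prod.fst).reverse =
      ((Vl T kn i).drop (i - kn)).tail := by
    rw [← hc]; rfl
  refine ⟨?_, stkOk_push _ _ hins', stkOk_tail _ houts0, ?_⟩
  · show PySem.List.pySetD vals (i : Int) _ = _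
    rw [hvals, set_mid T kn i hin, ← Vl_succ T kn i hik]
  · show rest.map Prod.fst ++ ((bPush _ ins').map Prod.fst).reverse = _
    rw [map_fst_push, List.reverse_cons, ← List.append_assoc, hctail,
      window_next T kn i hk hik, ← Vl_succ T kn i hik]

theorem stepB_inv (T : List Int) (kn i : Nat) (hk : 1 ≤ kn) (hkn : kn ≤ T.length)
    (hik : kn ≤ i) (hin : i < T.length)
    (st : List Int × List (Int × Int) × List (Int × Int)) (h : BInv T kn i st) :
    BInv T kn (i + 1) (stepB st (i : Int)) := by
  obtain ⟨vals, ins, outs⟩ := st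
  obtain ⟨hvals, hins, houts, hcont⟩ := h
  dsimp only at hvals hins houts hcont
  have hwne : (Vl T kn i).drop (i - kn) ≠ [] := window_ne_nil T kn i hk hik (le_of_lt hin)
  have hget : PySem.List.pyGetD vals (i : Int) 0 = T.getD i 0 := by
    rw [hvals, get_mid T kn i hin]
  rcases ins with _ | ⟨a, tins⟩ <;> rcases outs with _ | ⟨b, touts⟩
  · exact absurd (by simpa using hcont.symm) hwne
  · -- ins = [], outs = b :: touts
    have hmin : ((Vl T kn i).drop (i - kn)).min?.getD 0 = b.2 := by
      rw [← hcont]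
      simp only [List.map_nil, List.reverse_nil, List.append_nil]
      rw [stkOk_min? _ houts]
      rfl
    show BInv T kn (i + 1) (PySem.List.pySetD vals (i : Int) _, bPush _ _, _)
    exact binv_assemble T kn i hk hik hin vals [] (b :: touts) _ hvals trivial houts
      (by simpa using hcont) (by simp) (by simp [hget, hmin])
  · -- ins = a :: tins, outs = []
    have hmin : ((Vl T kn i).drop (i - kn)).min?.getD 0 = a.2 := by
      rw [← hcont]
      simp only [List.map_nil, List.nil_append]
      rw [min?_reverse, stkOk_min? _ hins]
      rfl
    obtain ⟨hdok, hdmap⟩ := bDrain_spec (a :: tins) [] trivial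
    have hdne : bDrain (a :: tins) [] ≠ [] := by
      intro hnil
      rw [hnil] at hdmap
      apply hwne
      rw [← hcont]
      simp only [List.map_nil, List.nil_append]
      rw [show ((a :: tins).map Prod.fst).reverse = [] from by simpa using hdmap.symm]
    show BInv T kn (i + 1) (PySem.List.pySetD vals (i : Int) _, bPush _ [], (bDrain (a :: tins) []).tail)
    exact binv_assemble T kn i hk hik hin vals [] (bDrain (a :: tins) []) _ hvals trivial hdok
      (by rw [hdmap]; simpa using hcont) hdne (by simp [hget, hmin])
  · -- both nonempty
    have hmin : ((Vl T kn i).drop (i - kn)).min?.getD 0 = min a.2 b.2 := by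
      rw [← hcont, min?_append, min?_reverse, stkOk_min? _ hins, stkOk_min? _ houts]
      simp [omin, min_comm]
    show BInv T kn (i + 1) (PySem.List.pySetD vals (i : Int) _, bPush _ _, touts)
    exact binv_assemble T kn i hk hik hin vals (a :: tins) (b :: touts) _ hvals hins houts
      hcont (by simp) (by simp [hget, hmin])

theorem B_loop (T : List Int) (kn : Nat) (hk : 1 ≤ kn) (hkn : kn ≤ T.length)
    (i : Nat) (hik : kn ≤ i) (hin : i ≤ T.length)
    (st0 : List Int × List (Int × Int) × List (Int × Int)) (h0 : BInv T kn kn st0) :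
    BInv T kn i ((PySem.List.pyRange (kn : Int) (i : Int) 1).foldl stepB st0) := by
  induction i, hik using Nat.le_induction with
  | base => rw [PySem.List.pyRange_one_eq_nil le_rfl]; exact h0
  | succ i hik ih =>
    have hin' : i < T.length := by omega
    have hcast : ((i + 1 : Nat) : Int) = (i : Int) + 1 := by push_cast; ring
    rw [hcast, PySem.List.pyRange_one_succ_right (by exact_mod_cast hik), List.foldl_append]
    exact stepB_inv T kn i hk hkn hik hin' _ (ih (le_of_lt hin'))

theorem ksuma_alt_eq (T : List Int) (k : Int) (h1 : 1 ≤ k) (h2 : k ≤ (T.length : Int)) :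
    ksuma_alt T k = ((Vl T k.toNat T.length).drop (T.length - k.toNat)).min?.getD 0 := by
  set kn := k.toNat with hknd
  have hkcast : (kn : Int) = k := Int.toNat_of_nonneg (by omega)
  have hk : 1 ≤ kn := by omega
  have hkn : kn ≤ T.length := by omega
  rw [ksuma_alt_as_steps]
  simp only
  rw [← hkcast]
  obtain ⟨s, hfold, hok, hmap⟩ := B_init T kn hkn kn le_rfl
  rw [hfold]
  have h0 : BInv T kn kn (T, s, []) := by
    refine ⟨?_, hok, trivial, ?_⟩
    · show T = Vl T kn kn ++ T.drop kn
      rw [Vl_take T kn kn le_rfl hkn, List.take_append_drop]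
    · show [] ++ (s.map Prod.fst).reverse = _
      rw [List.nil_append, hmap, List.reverse_reverse, Nat.sub_self, List.drop_zero,
        Vl_take T kn kn le_rfl hkn]
  obtain ⟨hv1, -, -, -⟩ := B_loop T kn hk hkn T.length hkn le_rfl (T, s, []) h0
  rw [hv1]
  rw [List.drop_length, List.append_nil]
  rw [PySem.List.slice_from _ (by omega : (0:Int) ≤ (T.length : Int) - (kn : Int))]
  rw [pymin_eq]
  rw [show ((T.length : Int) - (kn : Int)).toNat = T.length - kn from by omega]

-- ===== VERDICT (by name: the statement is the Claim_ definition above) =====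
theorem ksuma_spec : Claim_equal_ksuma := by
  intro T k _ hpre
  unfold Spec_ksuma
  rw [ksuma_eq T k hpre.1 hpre.2, ksuma_alt_eq T k hpre.1 hpre.2]
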